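-- pv_equiv track=rewrite | github.com/jvasilakes-umn/umls_supp | ner/src/convert_brat_to_json.py | get_sentence_by_char_index
-- ===== SOURCE A (Python) =====
-- def get_sentence_by_char_index(sentences, index):
--     assert index >= 0
--     ch_idx = 0
--     for sent in sentences:
--         ch_idx += len(sent)
--         if ch_idx >= index:
--             return sent
--     return None
-- ===== SOURCE B (Python) =====
-- import bisect
-- import itertools
--
--
-- def get_sentence_by_char_index(sentences, index):
--     assert index >= 0
--     sents = list(sentences)
--     prefix = list(itertools.accumulate(len(s) for s in sents))
--     pos = bisect.bisect_left(prefix, index)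
--     return sents[pos] if pos < len(sents) else None
-- ===== Notes on version B (the rewrite author's own statement) =====
-- stated objective: alternative
-- what changed: Replaces the linear accumulate-and-compare scan with a precomputed cumulative-length table and a bisect_left binary search for the first sentence whose cumulative length reaches the index.
-- outside the precondition, e.g. on get_sentence_by_char_index(['ab'], -1): A raises AssertionError, B raises AssertionError
import Mathlib
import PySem

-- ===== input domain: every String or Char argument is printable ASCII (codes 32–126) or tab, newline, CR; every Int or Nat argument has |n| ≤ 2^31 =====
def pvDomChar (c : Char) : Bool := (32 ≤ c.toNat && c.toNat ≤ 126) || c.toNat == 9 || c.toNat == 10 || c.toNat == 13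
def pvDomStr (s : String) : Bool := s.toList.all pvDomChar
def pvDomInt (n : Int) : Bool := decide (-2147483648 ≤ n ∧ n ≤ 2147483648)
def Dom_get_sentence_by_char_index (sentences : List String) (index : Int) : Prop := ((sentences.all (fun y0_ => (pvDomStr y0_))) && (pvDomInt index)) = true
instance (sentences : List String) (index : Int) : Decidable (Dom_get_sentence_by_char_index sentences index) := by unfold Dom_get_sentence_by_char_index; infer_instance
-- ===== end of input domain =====

-- B replaces A's linear accumulate-and-compare scan with a cumulative-length table plus
-- a bisect_left binary search (alternative algorithm; same result, proved equivalent).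


-- ===== PORT A =====
-- A's loop: accumulate lengths, return the first sentence whose cumulative length ≥ index.
def pvGoA (sentences : List String) (ch_idx : Int) (index : Int) : Option String :=
  match sentences with
  | [] => none
  | sent :: rest =>
    let ch_idx' := ch_idx + (sent.length : Int)
    if ch_idx' ≥ index then some sent else pvGoA rest ch_idx' index

def get_sentence_by_char_index (sentences : List String) (index : Int) : Option String :=
  pvGoA sentences 0 index

-- ===== PORT B =====
-- itertools.accumulate of the lengths (running total acc)
def pvAccum (ls : List Int) (acc : Int) : List Int :=
  match ls with
  | [] => []
  | l :: rest => (acc + l) :: pvAccum rest (acc + l)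

-- CPython bisect_left: while lo < hi: mid = (lo+hi)//2; if a[mid] < x: lo = mid+1 else hi = mid
-- (fuel makes the loop structurally recursive; hi - lo shrinks each step, so fuel = hi suffices)
def pvBisectLeft (a : List Int) (x : Int) : Nat → Nat → Nat → Nat
  | 0, lo, _ => lo
  | fuel + 1, lo, hi =>
    if lo < hi then
      let mid := (lo + hi) / 2
      if a.getD mid 0 < x then pvBisectLeft a x fuel (mid + 1) hi
      else pvBisectLeft a x fuel lo mid
    else lo

def get_sentence_by_char_index_alt (sentences : List String) (index : Int) : Option String :=
  let pre := pvAccum (sentences.map (fun s => (s.length : Int))) 0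
  let pos := pvBisectLeft pre index pre.length 0 pre.length
  if pos < sentences.length then sentences[pos]? else none

-- ===== PRECONDITION & SPEC =====
-- Pre_ excludes index < 0, on which A's assert raises AssertionError (B asserts identically).
def Pre_get_sentence_by_char_index (sentences : List String) (index : Int) : Prop := 0 ≤ index
instance (sentences : List String) (index : Int) : Decidable (Pre_get_sentence_by_char_index sentences index) := by unfold Pre_get_sentence_by_char_index; infer_instance
def pvWitness_get_sentence_by_char_index : List String × Int := (["ab"], 1)

def Spec_get_sentence_by_char_index (sentences : List String) (index : Int) (out : Option String) : Prop := out = get_sentence_by_char_index_alt sentences index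
instance (sentences : List String) (index : Int) (out : Option String) : Decidable (Spec_get_sentence_by_char_index sentences index out) := by unfold Spec_get_sentence_by_char_index; infer_instance

-- ===== CLAIM (what is proved, stated in full; the proofs are below) =====
def Claim_equal_get_sentence_by_char_index : Prop := ∀ (sentences : List String) (index : Int), Dom_get_sentence_by_char_index sentences index → Pre_get_sentence_by_char_index sentences index → Spec_get_sentence_by_char_index sentences index (get_sentence_by_char_index sentences index)

-- ===== LEMMAS AND PROOFS =====

-- number of leading elements < x (the threshold position in a sorted list)
def pvLb (a : List Int) (x : Int) : Nat :=
  match a with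
  | [] => 0
  | p :: ps => if p < x then pvLb ps x + 1 else 0

-- A's scan returns the element at the threshold position of the accumulated prefixes
theorem pvGoA_eq_lb (sentences : List String) (ch x : Int) :
    pvGoA sentences ch x =
      sentences[pvLb (pvAccum (sentences.map (fun s => (s.length : Int))) ch) x]? := by
  induction sentences generalizing ch with
  | nil => simp [pvGoA, pvAccum, pvLb]
  | cons s rest ih =>
    by_cases h : ch + (s.length : Int) ≥ x
    · have h' : ¬ (ch + (s.length : Int) < x) := by omega
      simp [pvGoA, pvAccum, pvLb, h, h']
    · have h' : ch + (s.length : Int) < x := by omega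
      simp [pvGoA, pvAccum, pvLb, h, h', ih]

-- characterization of pvLb as the unique threshold
theorem pvLb_eq (a : List Int) (x : Int) (k : Nat)
    (hk : k ≤ a.length)
    (hlt : ∀ i, i < k → a.getD i 0 < x)
    (hge : k < a.length → x ≤ a.getD k 0) :
    pvLb a x = k := by
  induction a generalizing k with
  | nil => simp at hk; simp [pvLb, hk]
  | cons p ps ih =>
    match k with
    | 0 =>
      have : x ≤ p := by simpa using hge (by simp)
      simp [pvLb]; omega
    | k + 1 =>
      have hp : p < x := by simpa using hlt 0 (by omega)
      have : pvLb ps x = k := by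
        apply ih
        · simpa using hk
        · intro i hi; simpa using hlt (i + 1) (by omega)
        · intro hkl; simpa using hge (by simpa using hkl)
      simp [pvLb, hp, this]

-- binary search correctness on a monotone list (fuel ≥ hi - lo)
theorem pvBisectLeft_spec (a : List Int) (x : Int)
    (mono : ∀ i j, i ≤ j → j < a.length → a.getD i 0 ≤ a.getD j 0)
    (fuel lo hi : Nat) (hf : hi - lo ≤ fuel) (hlh : lo ≤ hi) (hha : hi ≤ a.length)
    (hlo : ∀ i, i < lo → a.getD i 0 < x)
    (hhi : ∀ i, hi ≤ i → i < a.length → x ≤ a.getD i 0) :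
    pvBisectLeft a x fuel lo hi = pvLb a x := by
  induction fuel generalizing lo hi with
  | zero =>
    have hle : lo = hi := by omega
    subst hle
    exact (pvLb_eq a x lo (by omega) (fun i hi' => hlo i hi')
      (fun hk => hhi lo (le_refl _) hk)).symm
  | succ fuel ih =>
    by_cases h : lo < hi
    · rw [pvBisectLeft]
      simp only [if_pos h]
      by_cases hm : a.getD ((lo + hi) / 2) 0 < x
      · rw [if_pos hm]
        refine ih ((lo + hi) / 2 + 1) hi (by omega) (by omega) hha (fun i hi' => ?_) hhi
        have : a.getD i 0 ≤ a.getD ((lo + hi) / 2) 0 := mono i _ (by omega) (by omega)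
        omega
      · rw [if_neg hm]
        refine ih lo ((lo + hi) / 2) (by omega) (by omega) (by omega) hlo (fun i hmi hil => ?_)
        have : a.getD ((lo + hi) / 2) 0 ≤ a.getD i 0 := mono _ i (by omega) hil
        omega
    · rw [pvBisectLeft]
      simp only [if_neg h]
      have hle : lo = hi := by omega
      subst hle
      exact (pvLb_eq a x lo (by omega) (fun i hi' => hlo i hi')
        (fun hk => hhi lo (le_refl _) hk)).symm

theorem pvAccum_length (ls : List Int) (acc : Int) : (pvAccum ls acc).length = ls.length := by
  induction ls generalizing acc with
  | nil => simp [pvAccum]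
  | cons l rest ih => simp [pvAccum, ih]

theorem pvAccum_lower (ls : List Int) (acc : Int) (hnn : ∀ l ∈ ls, 0 ≤ l) :
    ∀ y ∈ pvAccum ls acc, acc ≤ y := by
  induction ls generalizing acc with
  | nil => simp [pvAccum]
  | cons l rest ih =>
    intro y hy
    have hl : 0 ≤ l := hnn l (by simp)
    simp [pvAccum] at hy
    rcases hy with h | h
    · omega
    · have := ih (acc + l) (fun m hm => hnn m (by simp [hm])) y h
      omega

theorem pvAccum_sorted (ls : List Int) (acc : Int) (hnn : ∀ l ∈ ls, 0 ≤ l) :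
    (pvAccum ls acc).Pairwise (· ≤ ·) := by
  induction ls generalizing acc with
  | nil => simp [pvAccum]
  | cons l rest ih =>
    simp only [pvAccum, List.pairwise_cons]
    exact ⟨pvAccum_lower rest (acc + l) (fun m hm => hnn m (by simp [hm])),
           ih (acc + l) (fun m hm => hnn m (by simp [hm]))⟩

theorem pairwise_getD_mono (a : List Int) (hp : a.Pairwise (· ≤ ·)) :
    ∀ i j, i ≤ j → j < a.length → a.getD i 0 ≤ a.getD j 0 := by
  intro i j hij hj
  rcases eq_or_lt_of_le hij with h | h
  · subst h; exact le_refl _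
  · have hi : i < a.length := by omega
    have := List.pairwise_iff_getElem.mp hp i j hi hj h
    simpa [List.getD_eq_getElem?_getD, List.getElem?_eq_getElem, hi, hj] using this

-- ===== VERDICT (by name: the statement is the Claim_ definition above) =====
theorem get_sentence_by_char_index_spec : Claim_equal_get_sentence_by_char_index := by
  intro sentences index _hdom _hpre
  unfold Spec_get_sentence_by_char_index
  have hnn : ∀ l ∈ sentences.map (fun s => (s.length : Int)), 0 ≤ l := by
    intro l hl
    simp at hl
    obtain ⟨s, _, rfl⟩ := hl
    exact Int.natCast_nonneg _
  have hlen : (pvAccum (sentences.map (fun s => (s.length : Int))) 0).length = sentences.length := by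
    rw [pvAccum_length]; simp
  have hmono := pairwise_getD_mono _ (pvAccum_sorted (sentences.map (fun s => (s.length : Int))) 0 hnn)
  have hbs := pvBisectLeft_spec (pvAccum (sentences.map (fun s => (s.length : Int))) 0) index hmono
    (pvAccum (sentences.map (fun s => (s.length : Int))) 0).length
    0 (pvAccum (sentences.map (fun s => (s.length : Int))) 0).length
    (by omega) (Nat.zero_le _) (le_refl _) (by omega) (by intro i h1 h2; omega)
  simp only [get_sentence_by_char_index, get_sentence_by_char_index_alt, hbs]
  rw [pvGoA_eq_lb]
  by_cases hpos : pvLb (pvAccum (sentences.map (fun s => (s.length : Int))) 0) index < sentences.length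
  · simp [hpos]
  · simp [hpos]
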